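-- pv_equiv track=rewrite | github.com/MAOJIASONG/VisualReasonBench | Stacking_scaling/polypuzzle_batch.py | has_isolated_piece_in_solution
-- ===== SOURCE A (Python) =====
-- from typing import List, Tuple, Set, Dict
--
-- Vec = Tuple[int,int,int]
--
-- def has_isolated_piece_in_solution(placement_by_piece: Dict[int, Tuple[Vec,...]]) -> bool:
--     pieces = list(placement_by_piece.keys())
--     cells = {i: set(placement_by_piece[i]) for i in pieces}
--     for i in pieces:
--         touching_other = False
--         for (x,y,z) in cells[i]:
--             for j in pieces:
--                 if j==i: continue
--                 if (x+1,y,z) in cells[j] or (x-1,y,z) in cells[j] or (x,y+1,z) in cells[j] or (x,y-1,z) in cells[j] or (x,y,z+1) in cells[j] or (x,y,z-1) in cells[j]: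
--                     touching_other = True; break
--             if touching_other: break
--         if not touching_other:
--             return True
--     return False
-- ===== SOURCE B (Python) =====
-- def has_isolated_piece_in_solution(placement_by_piece):
--     # Build a global cell -> [owning piece ids] index once, then check each
--     # cell's 6 neighbors against that index, instead of scanning every other
--     # piece's cell set for every cell.
--     owner = {}
--     for pid, cells in placement_by_piece.items():
--         for c in cells:
--             owner.setdefault(c, []).append(pid)
--     for pid, cells in placement_by_piece.items():
--         touches = False
--         for (x, y, z) in cells:
--             for n in ((x+1, y, z), (x-1, y, z), (x, y+1, z), (x, y-1, z), (x, y, z+1), (x, y, z-1)):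
--                 if any(j != pid for j in owner.get(n, ())):
--                     touches = True
--                     break
--             if touches:
--                 break
--         if not touches:
--             return True
--     return False
-- ===== Notes on version B (the rewrite author's own statement) =====
-- stated objective: alternative
-- what changed: Instead of testing every cell of every piece against every other piece's cell set, B builds one global cell->owners index in a single pass and then checks each cell's 6 neighbors against that index once, removing the inner loop over pieces (asymptotically fewer probes when there are many pieces; not confirmed faster in a timing run on the generated inputs).
import Mathlib
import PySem

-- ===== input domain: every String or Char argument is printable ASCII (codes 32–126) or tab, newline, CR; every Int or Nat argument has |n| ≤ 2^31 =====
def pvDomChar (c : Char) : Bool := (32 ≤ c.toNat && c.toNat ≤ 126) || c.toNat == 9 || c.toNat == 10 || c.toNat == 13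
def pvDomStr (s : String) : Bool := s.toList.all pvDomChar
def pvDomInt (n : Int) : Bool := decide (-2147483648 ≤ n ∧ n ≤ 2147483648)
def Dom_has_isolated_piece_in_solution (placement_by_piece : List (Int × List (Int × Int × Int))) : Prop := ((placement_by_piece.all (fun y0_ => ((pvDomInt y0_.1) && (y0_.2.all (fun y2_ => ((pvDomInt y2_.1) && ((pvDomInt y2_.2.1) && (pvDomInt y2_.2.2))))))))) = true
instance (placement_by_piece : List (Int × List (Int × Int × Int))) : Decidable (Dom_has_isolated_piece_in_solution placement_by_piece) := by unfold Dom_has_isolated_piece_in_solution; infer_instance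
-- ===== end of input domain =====

-- B replaces A's per-piece scan over all other pieces' cell sets by one global
-- cell->owners index probed once per neighbor (an alternative single-index algorithm).


-- ===== PORT A =====
-- the big 'or' of the six neighbor membership tests in A's inner if
def pvSetHit (s : PySem.Set (Int × Int × Int)) (x y z : Int) : Bool :=
  PySem.Set.contains s (x + 1, y, z) || PySem.Set.contains s (x - 1, y, z) ||
  PySem.Set.contains s (x, y + 1, z) || PySem.Set.contains s (x, y - 1, z) ||
  PySem.Set.contains s (x, y, z + 1) || PySem.Set.contains s (x, y, z - 1)

def has_isolated_piece_in_solution (placement_by_piece : List (Int × List (Int × Int × Int))) : Bool :=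
  let d : PySem.Dict Int (List (Int × Int × Int)) := PySem.Dict.mk placement_by_piece
  let pieces : List Int := PySem.Dict.keys d
  -- cells = {i: set(placement_by_piece[i]) for i in pieces}; i is always a key, so [i] = getD i []
  let cells : PySem.Dict Int (PySem.Set (Int × Int × Int)) :=
    pieces.foldl (fun c i => c.insert i (PySem.Set.ofList (d.getD i []))) PySem.Dict.empty
  -- 'for i in pieces: … if not touching_other: return True / return False' = any over the negated inner scan
  pieces.any (fun i =>
    ! ((cells.getD i []).any (fun v =>
        pieces.any (fun j => (j != i) && pvSetHit (cells.getD j []) v.1 v.2.1 v.2.2))))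

-- ===== PORT B =====
def pvNbrs (v : Int × Int × Int) : List (Int × Int × Int) :=
  [(v.1 + 1, v.2.1, v.2.2), (v.1 - 1, v.2.1, v.2.2),
   (v.1, v.2.1 + 1, v.2.2), (v.1, v.2.1 - 1, v.2.2),
   (v.1, v.2.1, v.2.2 + 1), (v.1, v.2.1, v.2.2 - 1)]

-- owner.setdefault(c, []).append(pid)  =  modify c [] (· ++ [pid])
def pvOwnerAdd (pid : Int) (d : PySem.Dict (Int × Int × Int) (List Int))
    (cs : List (Int × Int × Int)) : PySem.Dict (Int × Int × Int) (List Int) :=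
  cs.foldl (fun d c => d.modify c [] (· ++ [pid])) d

def has_isolated_piece_in_solution_alt (placement_by_piece : List (Int × List (Int × Int × Int))) : Bool :=
  let owner : PySem.Dict (Int × Int × Int) (List Int) :=
    placement_by_piece.foldl (fun d pr => pvOwnerAdd pr.1 d pr.2) PySem.Dict.empty
  placement_by_piece.any (fun pr =>
    ! pr.2.any (fun v =>
        (pvNbrs v).any (fun n => (owner.getD n []).any (fun j => j != pr.1))))

-- ===== PRECONDITION & SPEC =====
-- Pre_ excludes association lists with duplicate piece ids: such a list does not represent a
-- Python dict (A's dict keeps the last value per key while the first-match convention keeps the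
-- first), so neither reading of it is specified.
def Pre_has_isolated_piece_in_solution (placement_by_piece : List (Int × List (Int × Int × Int))) : Prop :=
  (placement_by_piece.map Prod.fst).Nodup
instance (placement_by_piece : List (Int × List (Int × Int × Int))) : Decidable (Pre_has_isolated_piece_in_solution placement_by_piece) := by unfold Pre_has_isolated_piece_in_solution; infer_instance

def pvWitness_has_isolated_piece_in_solution : (List (Int × List (Int × Int × Int))) :=
  [(0, [(0, 0, 0)]), (1, [(1, 0, 0)])]

def Spec_has_isolated_piece_in_solution (placement_by_piece : List (Int × List (Int × Int × Int))) (out : Bool) : Prop := out = has_isolated_piece_in_solution_alt placement_by_piece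
instance (placement_by_piece : List (Int × List (Int × Int × Int))) (out : Bool) : Decidable (Spec_has_isolated_piece_in_solution placement_by_piece out) := by unfold Spec_has_isolated_piece_in_solution; infer_instance

-- ===== CLAIM (what is proved, stated in full; the proofs are below) =====
def Claim_equal_has_isolated_piece_in_solution : Prop := ∀ (placement_by_piece : List (Int × List (Int × Int × Int))), Dom_has_isolated_piece_in_solution placement_by_piece → Pre_has_isolated_piece_in_solution placement_by_piece → Spec_has_isolated_piece_in_solution placement_by_piece (has_isolated_piece_in_solution placement_by_piece)

-- ===== LEMMAS AND PROOFS =====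

-- the cells table built by A's dict comprehension is a pure function table
theorem pv_getD_table (keys : List Int) (f : Int → PySem.Set (Int × Int × Int))
    (c0 : PySem.Dict Int (PySem.Set (Int × Int × Int))) (k : Int) :
    (keys.foldl (fun c i => c.insert i (f i)) c0).getD k [] =
      if k ∈ keys then f k else c0.getD k [] := by
  induction keys generalizing c0 with
  | nil => simp
  | cons i ks ih =>
    simp only [List.foldl_cons, ih, PySem.Dict.getD_insert, List.mem_cons]
    by_cases h1 : k ∈ ks <;> by_cases h2 : k = i <;> simp [h1, h2]

theorem pv_ownerAdd_mem (pid : Int) (cs : List (Int × Int × Int))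
    (d : PySem.Dict (Int × Int × Int) (List Int)) (n : Int × Int × Int) (j : Int) :
    j ∈ (pvOwnerAdd pid d cs).getD n [] ↔ j ∈ d.getD n [] ∨ (j = pid ∧ n ∈ cs) := by
  induction cs generalizing d with
  | nil => simp [pvOwnerAdd]
  | cons c cs ih =>
    simp only [pvOwnerAdd, List.foldl_cons] at *
    rw [ih]
    rw [PySem.Dict.getD_modify]
    by_cases h : n = c
    · simp [h]; tauto
    · simp [h]

theorem pv_owner_mem (p : List (Int × List (Int × Int × Int)))
    (d : PySem.Dict (Int × Int × Int) (List Int)) (n : Int × Int × Int) (j : Int) :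
    j ∈ (p.foldl (fun d pr => pvOwnerAdd pr.1 d pr.2) d).getD n [] ↔
      j ∈ d.getD n [] ∨ ∃ pr ∈ p, pr.1 = j ∧ n ∈ pr.2 := by
  induction p generalizing d with
  | nil => simp
  | cons pr p ih =>
    simp only [List.foldl_cons, ih, pv_ownerAdd_mem, List.mem_cons]
    constructor
    · rintro (((h | ⟨rfl, h⟩) | h))
      · exact Or.inl h
      · exact Or.inr ⟨pr, Or.inl rfl, rfl, h⟩
      · rcases h with ⟨qr, hq, h⟩; exact Or.inr ⟨qr, Or.inr hq, h⟩
    · rintro (h | ⟨qr, (rfl | hq), rfl, h⟩)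
      · exact Or.inl (Or.inl h)
      · exact Or.inl (Or.inr ⟨rfl, h⟩)
      · exact Or.inr ⟨qr, hq, rfl, h⟩

theorem pv_lookup (p : List (Int × List (Int × Int × Int)))
    (h : (p.map Prod.fst).Nodup) (pr : Int × List (Int × Int × Int)) (hpr : pr ∈ p) :
    (PySem.Dict.mk p).getD pr.1 [] = pr.2 := by
  apply PySem.Dict.getD_of_mem_items (v := pr.2)
  · exact (show pr ∈ p from hpr)
  · exact h

theorem pv_hit_iff (s : PySem.Set (Int × Int × Int)) (v : Int × Int × Int) :
    pvSetHit s v.1 v.2.1 v.2.2 = true ↔ ∃ n ∈ pvNbrs v, PySem.Set.contains s n = true := by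
  simp [pvSetHit, pvNbrs]
  tauto

-- the common propositional reading of "piece pr touches some other piece"
def pvTouch (p : List (Int × List (Int × Int × Int))) (pr : Int × List (Int × Int × Int)) : Prop :=
  ∃ v ∈ pr.2, ∃ qr ∈ p, qr.1 ≠ pr.1 ∧ ∃ n ∈ pvNbrs v, n ∈ qr.2

theorem pvA_iff (p : List (Int × List (Int × Int × Int))) (hpre : (p.map Prod.fst).Nodup) :
    has_isolated_piece_in_solution p = true ↔ ∃ pr ∈ p, ¬ pvTouch p pr := by
  unfold has_isolated_piece_in_solution
  simp only [show (PySem.Dict.mk p).keys = p.map Prod.fst from rfl,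
    List.any_map, List.any_eq_true, Function.comp_apply, Bool.not_eq_true',
    List.any_eq_false, pv_getD_table, PySem.Dict.getD_empty, List.mem_map]
  constructor <;> rintro ⟨pr, hpr, h⟩ <;> refine ⟨pr, hpr, ?_⟩
  · rintro ⟨v, hv, qr, hqr, hne, n, hn, hnq⟩
    have hv2 : v ∈ (if ∃ a ∈ p, a.1 = pr.1 then
        PySem.Set.ofList ((PySem.Dict.mk p).getD pr.1 []) else []) := by
      rw [if_pos ⟨pr, hpr, rfl⟩, pv_lookup p hpre pr hpr, PySem.Set.mem_ofList]
      exact hv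
    refine h v hv2 ⟨qr, hqr, ?_⟩
    simp only [Bool.and_eq_true, bne_iff_ne]
    refine ⟨hne, ?_⟩
    rw [pv_hit_iff]
    refine ⟨n, hn, ?_⟩
    rw [if_pos ⟨qr, hqr, rfl⟩, pv_lookup p hpre qr hqr, PySem.Set.contains_iff,
      PySem.Set.mem_ofList]
    exact hnq
  · intro v hv
    rw [if_pos ⟨pr, hpr, rfl⟩, pv_lookup p hpre pr hpr, PySem.Set.mem_ofList] at hv
    rintro ⟨qr, hqr, hq⟩
    simp only [Bool.and_eq_true, bne_iff_ne, pv_hit_iff] at hq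
    obtain ⟨hne, n, hn, hc⟩ := hq
    rw [if_pos ⟨qr, hqr, rfl⟩, pv_lookup p hpre qr hqr, PySem.Set.contains_iff,
      PySem.Set.mem_ofList] at hc
    exact h ⟨v, hv, qr, hqr, hne, n, hn, hc⟩

theorem pvB_iff (p : List (Int × List (Int × Int × Int))) :
    has_isolated_piece_in_solution_alt p = true ↔ ∃ pr ∈ p, ¬ pvTouch p pr := by
  unfold has_isolated_piece_in_solution_alt
  simp only [List.any_eq_true, Bool.not_eq_true', List.any_eq_false, pv_owner_mem,
    PySem.Dict.getD_empty, List.not_mem_nil, false_or, bne_iff_ne]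
  constructor <;> rintro ⟨pr, hpr, h⟩ <;> refine ⟨pr, hpr, ?_⟩
  · rintro ⟨v, hv, qr, hqr, hne, n, hn, hnq⟩
    exact h v hv ⟨n, hn, qr.1, ⟨qr, hqr, rfl, hnq⟩, hne⟩
  · intro v hv
    rintro ⟨n, hn, j, ⟨qr, hqr, rfl, hnq⟩, hne⟩
    exact h ⟨v, hv, qr, hqr, hne, n, hn, hnq⟩

-- ===== VERDICT (by name: the statement is the Claim_ definition above) =====
theorem has_isolated_piece_in_solution_spec : Claim_equal_has_isolated_piece_in_solution := by
  intro p _ hpre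
  unfold Spec_has_isolated_piece_in_solution
  rw [Bool.eq_iff_iff, pvA_iff p hpre, pvB_iff p]
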